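-- pv_equiv track=rewrite | github.com/UKMIITB/WhatsappChatAnalysis | SourceCode.py | GetIndividualDataDistribution
-- ===== SOURCE A (Python) =====
-- def GetIndividualDataDistribution(chatDataList):
--     '''
--     Input: list output from getSimplifiedChatData function
--     output: Dictionary[First Name as key]: ChatData for that Individual
--     '''
--     MembersData = {}
--
--     for item in chatDataList:
--         firstName = item[2].split()[0]
--         if firstName not in MembersData:
--             MembersData[firstName] = []
--
--         MembersData[firstName].append(item)
--
--     return MembersData
-- ===== SOURCE B (Python) =====
-- def GetIndividualDataDistribution(chatDataList):
--     # Alternative decomposition: collect the distinct first names in order of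
--     # first appearance, then build each group with one filter pass per name.
--     names = []
--     for item in chatDataList:
--         fn = item[2].split()[0]
--         if fn not in names:
--             names.append(fn)
--     return {n: [it for it in chatDataList if it[2].split()[0] == n] for n in names}
-- ===== Notes on version B (the rewrite author's own statement) =====
-- stated objective: alternative
-- what changed: Replaces the single dict-building pass (membership test + append per item) with a two-phase strategy: one pass collecting distinct first names in first-appearance order, then one filter pass over the whole list per name to build each group.
import Mathlib
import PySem

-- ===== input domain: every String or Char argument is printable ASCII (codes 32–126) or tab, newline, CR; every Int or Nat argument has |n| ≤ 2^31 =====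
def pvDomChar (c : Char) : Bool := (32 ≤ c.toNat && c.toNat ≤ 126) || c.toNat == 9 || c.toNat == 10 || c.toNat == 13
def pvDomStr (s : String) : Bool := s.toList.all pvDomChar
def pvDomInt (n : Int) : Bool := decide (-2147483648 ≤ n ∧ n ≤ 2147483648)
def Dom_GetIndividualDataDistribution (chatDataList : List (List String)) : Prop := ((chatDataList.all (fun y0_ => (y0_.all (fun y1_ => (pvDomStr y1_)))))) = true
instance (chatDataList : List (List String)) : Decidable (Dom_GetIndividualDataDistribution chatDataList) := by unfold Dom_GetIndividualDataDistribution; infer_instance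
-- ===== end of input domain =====

-- B replaces A's single dict-building pass by a distinct-names pass followed by one filter per name (alternative decomposition, same results).


-- shared key expression: item[2].split()[0]  (both Pythons compute it textually)
def pvFirstName (item : List String) : String :=
  (PySem.Str.split₀ ((PySem.List.pyGet? item 2).getD "")).headD ""

-- ===== PORT A =====
def GetIndividualDataDistribution (chatDataList : List (List String)) : List (String × List (List String)) :=
  (chatDataList.foldl
    (fun (d : PySem.Dict String (List (List String))) item =>
      let firstName := pvFirstName item
      let d := if d.contains firstName then d else d.insert firstName []
      d.modify firstName [] (fun xs => xs ++ [item]))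
    PySem.Dict.empty).items

-- ===== PORT B =====
def GetIndividualDataDistribution_alt (chatDataList : List (List String)) : List (String × List (List String)) :=
  let names := chatDataList.foldl
    (fun (acc : List String) item =>
      let fn := pvFirstName item
      if fn ∈ acc then acc else acc ++ [fn]) []
  names.map (fun n => (n, chatDataList.filter (fun it => pvFirstName it == n)))

-- ===== PRECONDITION & SPEC =====
-- Pre_ excludes exactly the inputs where A raises: an item shorter than 3 entries (IndexError on item[2])
-- or whose item[2] is empty/whitespace-only (IndexError on split()[0]).
def Pre_GetIndividualDataDistribution (chatDataList : List (List String)) : Prop :=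
  ∀ item ∈ chatDataList, 3 ≤ item.length ∧ PySem.Str.split₀ (item.getD 2 "") ≠ []
instance (chatDataList : List (List String)) : Decidable (Pre_GetIndividualDataDistribution chatDataList) := by
  unfold Pre_GetIndividualDataDistribution; infer_instance
def pvWitness_GetIndividualDataDistribution : List (List String) :=
  [["12/1/20", "10:00", "John Doe", "hi"], ["12/1/20", "10:01", "Jane Roe", "yo"], ["12/1/20", "10:02", "John Doe", "ok"]]
def Spec_GetIndividualDataDistribution (chatDataList : List (List String)) (out : List (String × List (List String))) : Prop := out = GetIndividualDataDistribution_alt chatDataList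
instance (chatDataList : List (List String)) (out : List (String × List (List String))) : Decidable (Spec_GetIndividualDataDistribution chatDataList out) := by unfold Spec_GetIndividualDataDistribution; infer_instance

-- ===== CLAIM (what is proved, stated in full; the proofs are below) =====
def Claim_equal_GetIndividualDataDistribution : Prop := ∀ (chatDataList : List (List String)), Dom_GetIndividualDataDistribution chatDataList → Pre_GetIndividualDataDistribution chatDataList → Spec_GetIndividualDataDistribution chatDataList (GetIndividualDataDistribution chatDataList)

-- ===== LEMMAS AND PROOFS =====

-- A's loop body (setdefault-style guard then append) is one Dict.modify.
theorem pvStep_eq (d : PySem.Dict String (List (List String))) (item : List String) :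
    (if d.contains (pvFirstName item) then d else d.insert (pvFirstName item) []).modify
      (pvFirstName item) [] (fun xs => xs ++ [item])
    = d.modify (pvFirstName item) [] (fun xs => xs ++ [item]) := by
  by_cases h : d.contains (pvFirstName item) = true
  · simp [h]
  · rw [if_neg h]
    simp [PySem.Dict.modify, PySem.Dict.getD_insert_self, PySem.Dict.insert_insert_self,
      PySem.Dict.getD_of_not_contains _ _ (by simpa using h)]

theorem pvA_eq (l : List (List String)) :
    GetIndividualDataDistribution l
    = (PySem.Set.ofList (l.map pvFirstName)).map
        (fun n => (n, l.filter (fun it => pvFirstName it == n))) := by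
  unfold GetIndividualDataDistribution
  have hfold : l.foldl
      (fun (d : PySem.Dict String (List (List String))) item =>
        let firstName := pvFirstName item
        let d := if d.contains firstName then d else d.insert firstName []
        d.modify firstName [] (fun xs => xs ++ [item])) PySem.Dict.empty
      = l.foldl (fun d item => d.modify (pvFirstName item) [] (fun xs => xs ++ [item]))
          PySem.Dict.empty := by
    apply PySem.List.foldl_congr_mem
    intro d item _
    exact pvStep_eq d item
  rw [hfold]
  have hnodup : (l.foldl (fun d item => d.modify (pvFirstName item) [] (fun xs => xs ++ [item]))
      (PySem.Dict.empty : PySem.Dict String (List (List String)))).keys.Nodup := by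
    exact PySem.Dict.nodup_keys_foldl_modify_key l pvFirstName [] (fun _ item xs => xs ++ [item]) _
      (by simp [PySem.Dict.keys_empty])
  rw [PySem.Dict.items_eq_map_keys _ hnodup []]
  have hkeys : (l.foldl (fun d item => d.modify (pvFirstName item) [] (fun xs => xs ++ [item]))
      (PySem.Dict.empty : PySem.Dict String (List (List String)))).keys
      = PySem.Set.ofList (l.map pvFirstName) := by
    rw [PySem.Dict.keys_foldl_modify_key]
    simp [PySem.Dict.keys_empty, PySem.Set.update_nil_left]
  rw [hkeys]
  apply List.map_congr_left
  intro n _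
  have hgetD : (l.foldl (fun d item => d.modify (pvFirstName item) [] (fun xs => xs ++ [item]))
      (PySem.Dict.empty : PySem.Dict String (List (List String)))).getD n []
      = l.filter (fun it => pvFirstName it == n) := by
    have hm : l.foldl (fun d item => d.modify (pvFirstName item) [] (fun xs => xs ++ [item]))
        (PySem.Dict.empty : PySem.Dict String (List (List String)))
        = (l.map (fun it => (pvFirstName it, it))).foldl
            (fun d p => d.modify p.1 [] (fun xs => xs ++ [p.2])) PySem.Dict.empty := by
      rw [List.foldl_map]
    rw [hm, PySem.Dict.getD_foldl_modify_append]
    simp [List.filter_map, Function.comp_def]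
  rw [hgetD]

theorem pvB_eq (l : List (List String)) :
    GetIndividualDataDistribution_alt l
    = (PySem.Set.ofList (l.map pvFirstName)).map
        (fun n => (n, l.filter (fun it => pvFirstName it == n))) := by
  unfold GetIndividualDataDistribution_alt
  have hnames : l.foldl
      (fun (acc : List String) item =>
        let fn := pvFirstName item
        if fn ∈ acc then acc else acc ++ [fn]) []
      = PySem.Set.ofList (l.map pvFirstName) := by
    rw [← PySem.Set.update_nil_left, PySem.Set.update_map_eq_foldl_add]
    apply PySem.List.foldl_congr_mem
    intro acc item _
    simp [PySem.Set.add_eq_ite]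
  rw [hnames]

-- ===== VERDICT (by name: the statement is the Claim_ definition above) =====
theorem GetIndividualDataDistribution_spec : Claim_equal_GetIndividualDataDistribution := by
  intro l _ _
  unfold Spec_GetIndividualDataDistribution
  rw [pvA_eq, pvB_eq]
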